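-- pv_equiv track=rewrite | github.com/mbarnson/engrave | src/engrave/corpus/chunker.py | _count_bars
-- ===== SOURCE A (Python) =====
-- def _count_bars(ly_fragment: str) -> int:
--     """Count bar checks (|) in a LilyPond fragment.
--
--     Uses simple counting of '|' characters that are not inside strings or
--     part of other barline commands. This is a best-effort count.
--
--     Args:
--         ly_fragment: A LilyPond source fragment.
--
--     Returns:
--         Number of bar checks found.
--     """
--     count = 0
--     in_string = False
--     i = 0
--     while i < len(ly_fragment):
--         ch = ly_fragment[i]
--         if ch == '"':
--             in_string = not in_string
--         elif ch == "|" and not in_string: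
--             # Check it's not part of "||" inside a \bar command
--             # Simple heuristic: standalone | is a bar check
--             count += 1
--         elif ch == "%" and not in_string:
--             # Skip to end of line (line comment)
--             newline = ly_fragment.find("\n", i)
--             if newline == -1:
--                 break
--             i = newline
--         i += 1
--     return count
-- ===== SOURCE B (Python) =====
-- def _count_bars(ly_fragment: str) -> int:
--     """Count bar checks (|) outside string literals and line comments.
--
--     Skip-scan: jump from one special character (quote or percent) to the
--     next with str.find, and count the '|' characters of each plain segment
--     wholesale with str.count, instead of walking the text char by char.
--     """
--     count = 0
--     i = 0
--     n = len(ly_fragment)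
--     while i < n:
--         q = ly_fragment.find('"', i)
--         c = ly_fragment.find('%', i)
--         if q == -1 and c == -1:
--             return count + ly_fragment.count('|', i)
--         if c == -1 or (q != -1 and q < c):
--             # string literal starts at q; skip to its closing quote
--             count += ly_fragment.count('|', i, q)
--             end = ly_fragment.find('"', q + 1)
--             if end == -1:
--                 return count
--             i = end + 1
--         else:
--             # line comment starts at c; skip to end of line
--             count += ly_fragment.count('|', i, c)
--             nl = ly_fragment.find('\n', c + 1)
--             if nl == -1:
--                 return count
--             i = nl + 1
--     return count
-- ===== Notes on version B (the rewrite author's own statement) =====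
-- stated objective: faster
-- what changed: Replaced the per-character state-machine loop (in_string flag, one branch per char) by a skip-scan that jumps between special characters with str.find and counts each plain segment's '|' wholesale with str.count.
import Mathlib
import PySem

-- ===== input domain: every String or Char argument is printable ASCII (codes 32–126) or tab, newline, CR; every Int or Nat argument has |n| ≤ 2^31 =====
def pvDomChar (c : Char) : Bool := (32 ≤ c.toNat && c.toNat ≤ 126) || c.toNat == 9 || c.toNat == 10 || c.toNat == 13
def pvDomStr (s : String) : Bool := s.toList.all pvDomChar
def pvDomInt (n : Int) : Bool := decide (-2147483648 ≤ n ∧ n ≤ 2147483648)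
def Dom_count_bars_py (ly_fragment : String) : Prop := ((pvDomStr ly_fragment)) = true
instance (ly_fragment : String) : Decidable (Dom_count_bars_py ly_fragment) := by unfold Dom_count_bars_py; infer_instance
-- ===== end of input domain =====

-- B replaces A's per-character state-machine loop by a skip-scan that jumps between the
-- special characters '"'/'%' and counts each plain segment's '|' wholesale (objective: faster).

-- ===== PORT A =====
-- A's while-loop over index i, rendered as recursion on the remaining suffix of the text;
-- `ly_fragment.find("\n", i)` is rendered as findIdx? on the suffix after the '%'
-- (exact: the '%' at position i is not '\n', so searching from i equals searching from i+1).
def pvAGo : List Char → Bool → Int → Int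
  | [], _, count => count
  | ch :: rest, inStr, count =>
    if ch = '"' then pvAGo rest (!inStr) count
    else if ch = '|' ∧ inStr = false then pvAGo rest inStr (count + 1)
    else if ch = '%' ∧ inStr = false then
      match rest.findIdx? (fun c => c == '\n') with
      | none => count                                      -- find returned -1: break
      | some k => pvAGo (rest.drop (k + 1)) inStr count    -- i = newline; i += 1
    else pvAGo rest inStr count
termination_by cs _ _ => cs.length
decreasing_by all_goals (simp [List.length_drop]; try omega)

def count_bars_py (ly_fragment : String) : Int := pvAGo ly_fragment.toList false 0

-- ===== PORT B =====
-- B's while-loop, rendered as recursion on the remaining suffix: `find(sub, i)` on the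
-- full string is findIdx? on the suffix (positions are relative to i), `count('|', i, j)`
-- is List.count on the corresponding take, and `i = end + 1` is the corresponding drop.
-- The Python branch `if c == -1 or (q != -1 and q < c)` becomes the match on the two
-- Options (its string-literal body appears once per arm that selects it).
def pvBGo (cs : List Char) (count : Int) : Int :=
  match hq : cs.findIdx? (fun c => c == '"'), hc : cs.findIdx? (fun c => c == '%') with
  | none, none => count + (cs.count '|' : Int)
  | some qi, none =>
    let count' := count + ((cs.take qi).count '|' : Int)
    match (cs.drop (qi + 1)).findIdx? (fun c => c == '"') with
    | none => count'
    | some e => pvBGo ((cs.drop (qi + 1)).drop (e + 1)) count'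
  | none, some ci =>
    let count' := count + ((cs.take ci).count '|' : Int)
    match (cs.drop (ci + 1)).findIdx? (fun c => c == '\n') with
    | none => count'
    | some e => pvBGo ((cs.drop (ci + 1)).drop (e + 1)) count'
  | some qi, some ci =>
    if qi < ci then
      let count' := count + ((cs.take qi).count '|' : Int)
      match (cs.drop (qi + 1)).findIdx? (fun c => c == '"') with
      | none => count'
      | some e => pvBGo ((cs.drop (qi + 1)).drop (e + 1)) count'
    else
      let count' := count + ((cs.take ci).count '|' : Int)
      match (cs.drop (ci + 1)).findIdx? (fun c => c == '\n') with
      | none => count'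
      | some e => pvBGo ((cs.drop (ci + 1)).drop (e + 1)) count'
termination_by cs.length
decreasing_by
  all_goals
    first
    | (have := (List.findIdx?_eq_some_iff_findIdx_eq.mp hq).1
       simp [List.length_drop]; omega)
    | (have := (List.findIdx?_eq_some_iff_findIdx_eq.mp hc).1
       simp [List.length_drop]; omega)

def count_bars_py_alt (ly_fragment : String) : Int := pvBGo ly_fragment.toList 0

-- ===== PRECONDITION & SPEC =====
def Spec_count_bars_py (ly_fragment : String) (out : Int) : Prop := out = count_bars_py_alt ly_fragment
instance (ly_fragment : String) (out : Int) : Decidable (Spec_count_bars_py ly_fragment out) := by unfold Spec_count_bars_py; infer_instance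

-- ===== CLAIM (what is proved, stated in full; the proofs are below) =====
def Claim_equal_count_bars_py : Prop := ∀ (ly_fragment : String), Dom_count_bars_py ly_fragment → Spec_count_bars_py ly_fragment (count_bars_py ly_fragment)

-- ===== LEMMAS AND PROOFS =====

-- A in string mode skips to the next '"' (or to the end), counting nothing.
theorem pvAGo_true (cs : List Char) (count : Int) :
    pvAGo cs true count =
      match cs.findIdx? (fun c => c == '"') with
      | none => count
      | some k => pvAGo (cs.drop (k + 1)) false count := by
  induction cs with
  | nil => simp [pvAGo, List.findIdx?_nil]
  | cons c rest ih =>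
    by_cases h : c = '"'
    · subst h
      simp [pvAGo, List.findIdx?_cons]
    · have hb : (c == '"') = false := by simpa using h
      simp only [pvAGo, if_neg h, List.findIdx?_cons, hb, Bool.false_eq_true, if_false]
      rw [if_neg (by simp), if_neg (by simp)]
      rw [ih]
      cases hfi : rest.findIdx? (fun c => c == '"') <;> simp [hfi]

-- A over a prefix with no '"' and no '%' just adds that prefix's '|'-count.
theorem pvAGo_plain (p s : List Char) (count : Int)
    (h : ∀ c ∈ p, c ≠ '"' ∧ c ≠ '%') :
    pvAGo (p ++ s) false count = pvAGo s false (count + (p.count '|' : Int)) := by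
  induction p generalizing count with
  | nil => simp
  | cons c p' ih =>
    obtain ⟨hq, hc⟩ := h c (by simp)
    have h' : ∀ x ∈ p', x ≠ '"' ∧ x ≠ '%' := fun x hx => h x (by simp [hx])
    by_cases hbar : c = '|'
    · subst hbar
      simp only [List.cons_append, pvAGo, if_neg hq]
      rw [if_pos (by simp), ih _ h']
      simp [List.count_cons]
      ring_nf
    · simp only [List.cons_append, pvAGo, if_neg hq]
      rw [if_neg (by simp [hbar]), if_neg (by simp [hc]), ih _ h']
      simp [List.count_cons, hbar]

-- membership in a take gives an index below the cut
theorem pvMemTake {cs : List Char} {k : Nat} {c : Char} (hm : c ∈ cs.take k) :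
    ∃ j, j < k ∧ ∃ hj : j < cs.length, cs[j] = c := by
  obtain ⟨j, hj, rfl⟩ := List.getElem_of_mem hm
  have hjk : j < k := lt_of_lt_of_le hj (by simp [List.length_take])
  have hjl : j < cs.length := by
    have := hj; simp [List.length_take] at this; omega
  exact ⟨j, hjk, hjl, (List.getElem_take).symm ▸ rfl⟩

-- A on a text whose first '"' is at qi, with no '%' before it:
-- count the plain prefix, then skip the string literal.
theorem pvA_seg_string (cs : List Char) (qi : Nat)
    (hq : cs.findIdx? (fun c => c == '"') = some qi)
    (hplain : ∀ c ∈ cs.take qi, c ≠ '"' ∧ c ≠ '%') (count : Int) :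
    pvAGo cs false count =
      (match (cs.drop (qi + 1)).findIdx? (fun c => c == '"') with
       | none => count + ((cs.take qi).count '|' : Int)
       | some e => pvAGo ((cs.drop (qi + 1)).drop (e + 1)) false
           (count + ((cs.take qi).count '|' : Int))) := by
  obtain ⟨hlt, hch, -⟩ := List.findIdx?_eq_some_iff_getElem.mp hq
  have hch' : cs[qi] = '"' := by simpa using hch
  have hdecomp : cs = cs.take qi ++ cs[qi] :: cs.drop (qi + 1) := by
    conv_lhs => rw [← List.take_append_drop qi cs]
    rw [List.drop_eq_getElem_cons hlt]
  conv_lhs => rw [hdecomp]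
  rw [pvAGo_plain _ _ _ hplain, hch']
  simp only [pvAGo, if_pos rfl, Bool.not_false]
  rw [pvAGo_true]
  simp

-- A on a text whose first '%' is at ci, with no '"' before it:
-- count the plain prefix, then skip the comment.
theorem pvA_seg_comment (cs : List Char) (ci : Nat)
    (hc : cs.findIdx? (fun c => c == '%') = some ci)
    (hplain : ∀ c ∈ cs.take ci, c ≠ '"' ∧ c ≠ '%') (count : Int) :
    pvAGo cs false count =
      (match (cs.drop (ci + 1)).findIdx? (fun c => c == '\n') with
       | none => count + ((cs.take ci).count '|' : Int)
       | some k => pvAGo ((cs.drop (ci + 1)).drop (k + 1)) false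
           (count + ((cs.take ci).count '|' : Int))) := by
  obtain ⟨hlt, hch, -⟩ := List.findIdx?_eq_some_iff_getElem.mp hc
  have hch' : cs[ci] = '%' := by simpa using hch
  have hdecomp : cs = cs.take ci ++ cs[ci] :: cs.drop (ci + 1) := by
    conv_lhs => rw [← List.take_append_drop ci cs]
    rw [List.drop_eq_getElem_cons hlt]
  conv_lhs => rw [hdecomp]
  rw [pvAGo_plain _ _ _ hplain, hch']
  simp only [pvAGo, if_neg (by decide : ¬('%' = '"'))]
  rw [if_neg (by simp), if_pos (by simp)]

theorem pvMain : ∀ (n : Nat) (cs : List Char), cs.length ≤ n → ∀ count : Int,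
    pvBGo cs count = pvAGo cs false count := by
  intro n
  induction n with
  | zero =>
    intro cs h count
    have : cs = [] := List.eq_nil_of_length_eq_zero (Nat.le_zero.mp h)
    subst this
    rw [pvBGo]
    simp [pvAGo, List.findIdx?_nil]
  | succ n ih =>
    intro cs hlen count
    rw [pvBGo]
    split
    · -- no '"' and no '%' at all: one plain segment
      rename_i hq hc
      have hplain : ∀ c ∈ cs, c ≠ '"' ∧ c ≠ '%' := by
        intro c hm
        constructor <;> intro e <;> subst e
        · simpa using List.findIdx?_eq_none_iff.mp hq _ hm
        · simpa using List.findIdx?_eq_none_iff.mp hc _ hm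
      have := pvAGo_plain cs [] count hplain
      simp only [List.append_nil] at this
      rw [this]
      simp [pvAGo]
    · -- a string literal comes first ('%' absent)
      rename_i qi hq hc
      have hlt := (List.findIdx?_eq_some_iff_findIdx_eq.mp hq).1
      obtain ⟨hw1, hw2, hbef⟩ := List.findIdx?_eq_some_iff_getElem.mp hq
      have hplain : ∀ c ∈ cs.take qi, c ≠ '"' ∧ c ≠ '%' := by
        intro c hm
        obtain ⟨j, hjk, hjl, rfl⟩ := pvMemTake hm
        constructor <;> intro e
        · exact hbef j hjk (by simp [e])
        · simpa [e] using List.findIdx?_eq_none_iff.mp hc _ (List.getElem_mem hjl)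
      rw [pvA_seg_string cs qi hq hplain count]
      cases he : (cs.drop (qi + 1)).findIdx? (fun c => c == '"') with
      | none => simp
      | some e =>
        simp only []
        apply ih
        simp only [List.length_drop]
        omega
    · -- a comment comes first ('"' absent)
      rename_i ci hq hc
      have hlt := (List.findIdx?_eq_some_iff_findIdx_eq.mp hc).1
      obtain ⟨hw1, hw2, hbef⟩ := List.findIdx?_eq_some_iff_getElem.mp hc
      have hplain : ∀ c ∈ cs.take ci, c ≠ '"' ∧ c ≠ '%' := by
        intro c hm
        obtain ⟨j, hjk, hjl, rfl⟩ := pvMemTake hm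
        constructor <;> intro e
        · simpa [e] using List.findIdx?_eq_none_iff.mp hq _ (List.getElem_mem hjl)
        · exact hbef j hjk (by simp [e])
      rw [pvA_seg_comment cs ci hc hplain count]
      cases he : (cs.drop (ci + 1)).findIdx? (fun c => c == '\n') with
      | none => simp
      | some k =>
        simp only []
        apply ih
        simp only [List.length_drop]
        omega
    · -- both present: the earlier one wins
      rename_i qi ci hq hc
      have hltq := (List.findIdx?_eq_some_iff_findIdx_eq.mp hq).1
      have hltc := (List.findIdx?_eq_some_iff_findIdx_eq.mp hc).1
      obtain ⟨hwq1, hwq2, hbefq⟩ := List.findIdx?_eq_some_iff_getElem.mp hq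
      obtain ⟨hwc1, hwc2, hbefc⟩ := List.findIdx?_eq_some_iff_getElem.mp hc
      split
      · rename_i hqc
        have hplain : ∀ c ∈ cs.take qi, c ≠ '"' ∧ c ≠ '%' := by
          intro c hm
          obtain ⟨j, hjk, hjl, rfl⟩ := pvMemTake hm
          exact ⟨fun e => hbefq j hjk (by simp [e]),
                fun e => hbefc j (lt_trans hjk hqc) (by simp [e])⟩
        rw [pvA_seg_string cs qi hq hplain count]
        cases he : (cs.drop (qi + 1)).findIdx? (fun c => c == '"') with
        | none => simp
        | some e =>
          simp only []
          apply ih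
          simp only [List.length_drop]
          omega
      · rename_i hqc
        have hcq : ci ≤ qi := Nat.le_of_not_lt hqc
        have hplain : ∀ c ∈ cs.take ci, c ≠ '"' ∧ c ≠ '%' := by
          intro c hm
          obtain ⟨j, hjk, hjl, rfl⟩ := pvMemTake hm
          exact ⟨fun e => hbefq j (lt_of_lt_of_le hjk hcq) (by simp [e]),
                fun e => hbefc j hjk (by simp [e])⟩
        rw [pvA_seg_comment cs ci hc hplain count]
        cases he : (cs.drop (ci + 1)).findIdx? (fun c => c == '\n') with
        | none => simp
        | some k =>
          simp only []
          apply ih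
          simp only [List.length_drop]
          omega

-- ===== VERDICT (by name: the statement is the Claim_ definition above) =====
theorem count_bars_py_spec : Claim_equal_count_bars_py := by
  intro s _
  unfold Spec_count_bars_py count_bars_py count_bars_py_alt
  exact (pvMain s.toList.length s.toList le_rfl 0).symm
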